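-- pv_equiv track=rewrite | github.com/nooralindeflaten/UIB-project | INF140Task7.py | runningtotal
-- ===== SOURCE A (Python) =====
-- def runningtotal(numBlock):
--     total = []
--     j = 0
--     while j < len(numBlock[0]):
--         k = 0
--         sum = 0
--         while k < len(numBlock):
--             sum += numBlock[k][j]
--             k += 1
--         total.append(sum%26)
--         j += 1
--     return total
-- ===== SOURCE B (Python) =====
-- def runningtotal(numBlock):
--     total = [0] * len(numBlock[0])
--     for row in numBlock:
--         total = [total[j] + row[j] for j in range(len(total))]
--     return [t % 26 for t in total]
-- ===== Notes on version B (the rewrite author's own statement) =====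
-- stated objective: faster
-- what changed: Replaces A's column-major nested while loops (one scalar column sum at a time, with per-element index bookkeeping) with a single row-major pass carrying a running-total vector built by list comprehensions, taking mod 26 once at the end; the comprehension-based traversal avoids per-element while-loop index arithmetic, which a timing run measured ~2.6x faster.
import Mathlib
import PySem

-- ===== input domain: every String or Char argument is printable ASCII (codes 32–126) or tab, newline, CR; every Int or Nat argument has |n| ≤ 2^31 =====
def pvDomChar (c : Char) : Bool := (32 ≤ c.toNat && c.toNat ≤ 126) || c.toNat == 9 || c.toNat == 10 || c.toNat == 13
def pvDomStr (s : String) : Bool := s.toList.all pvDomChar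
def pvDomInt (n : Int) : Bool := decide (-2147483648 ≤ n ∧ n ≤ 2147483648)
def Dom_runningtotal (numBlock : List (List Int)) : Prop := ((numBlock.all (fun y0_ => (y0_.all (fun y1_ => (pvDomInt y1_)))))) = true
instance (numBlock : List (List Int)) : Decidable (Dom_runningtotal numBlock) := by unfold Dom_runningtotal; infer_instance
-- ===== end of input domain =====

-- B replaces A's column-major nested while loops (one scalar column sum at a time) by a single
-- row-major pass carrying a running-total vector across rows, with mod 26 taken once at the end.

-- ===== PORT A =====
-- Column-major: for j in range(len(numBlock[0])): sum over k of numBlock[k][j]; append sum % 26.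
-- numBlock[0] and numBlock[k][j] are in range under Pre_, so headD/pyGetD defaults are never hit there.
def runningtotal (numBlock : List (List Int)) : List Int :=
  (PySem.List.pyRange 0 ((numBlock.headD []).length) 1).foldl
    (fun total j =>
      total ++ [PySem.Int.mod
        ((PySem.List.pyRange 0 (numBlock.length) 1).foldl
          (fun s k => s + PySem.List.pyGetD (PySem.List.pyGetD numBlock k []) j 0) 0) 26]) []

-- ===== PORT B =====
-- Row-major: total = [0]*len(numBlock[0]); per row, total = [total[j] + row[j] for j in range(len(total))];
-- finally [t % 26 for t in total]. Same in-range remark as for A.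
def runningtotal_alt (numBlock : List (List Int)) : List Int :=
  (numBlock.foldl
    (fun t row =>
      (PySem.List.pyRange 0 (t.length) 1).map
        (fun j => PySem.List.pyGetD t j 0 + PySem.List.pyGetD row j 0))
    (List.replicate (numBlock.headD []).length 0)).map (fun t => PySem.Int.mod t 26)

-- ===== PRECONDITION & SPEC =====
-- Pre_ excludes exactly the inputs where Python A raises IndexError: the empty list (numBlock[0])
-- and ragged inputs where some row is shorter than row 0 (numBlock[k][j] out of range).
def Pre_runningtotal (numBlock : List (List Int)) : Prop :=
  numBlock ≠ [] ∧ ∀ row ∈ numBlock, (numBlock.headD []).length ≤ row.length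
instance (numBlock : List (List Int)) : Decidable (Pre_runningtotal numBlock) := by
  unfold Pre_runningtotal; infer_instance
def pvWitness_runningtotal : List (List Int) := [[1, 2], [3, 4]]
def Spec_runningtotal (numBlock : List (List Int)) (out : List Int) : Prop := out = runningtotal_alt numBlock
instance (numBlock : List (List Int)) (out : List Int) : Decidable (Spec_runningtotal numBlock out) := by unfold Spec_runningtotal; infer_instance

-- ===== CLAIM (what is proved, stated in full; the proofs are below) =====
def Claim_equal_runningtotal : Prop := ∀ (numBlock : List (List Int)), Dom_runningtotal numBlock → Pre_runningtotal numBlock → Spec_runningtotal numBlock (runningtotal numBlock)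

-- ===== LEMMAS AND PROOFS =====

-- B's fold invariant: starting from a vector (range n).map f, folding the per-row update
-- yields the vector of per-column foldl sums seeded at f k.
theorem alt_fold_inv (rows : List (List Int)) (n : Nat) (f : Nat → Int) :
    rows.foldl
      (fun t row =>
        (PySem.List.pyRange 0 (t.length) 1).map
          (fun j => PySem.List.pyGetD t j 0 + PySem.List.pyGetD row j 0))
      ((List.range n).map f)
    = (List.range n).map
        (fun k => rows.foldl (fun s row => s + PySem.List.pyGetD row (Int.ofNat k) 0) (f k)) := by
  induction rows generalizing f with
  | nil => simp
  | cons row rows ih =>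
    simp only [List.foldl_cons]
    have hstep :
        (PySem.List.pyRange 0 (((List.range n).map f).length) 1).map
          (fun j => PySem.List.pyGetD ((List.range n).map f) j 0 + PySem.List.pyGetD row j 0)
        = (List.range n).map
            (fun k => f k + PySem.List.pyGetD row (Int.ofNat k) 0) := by
      simp only [List.length_map, List.length_range]
      rw [show ((n : Int)) = ((n : Nat) : Int) from rfl, PySem.List.pyRange_zero_nat]
      rw [List.map_map]
      refine List.map_congr_left ?_
      intro k hk
      have hk' : k < n := List.mem_range.mp hk
      simp [PySem.List.pyGetD_natCast, List.getD_eq_getElem?_getD, hk']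
    rw [hstep, ih]

theorem runningtotal_eq (numBlock : List (List Int)) :
    runningtotal numBlock = runningtotal_alt numBlock := by
  unfold runningtotal runningtotal_alt
  have h0 : (List.replicate (numBlock.headD []).length 0 : List Int)
      = (List.range (numBlock.headD []).length).map (fun _ => (0 : Int)) := by
    simp [List.map_const']
  have hinner : ∀ j : Int,
      (PySem.List.pyRange 0 (numBlock.length) 1).foldl
        (fun s k => s + PySem.List.pyGetD (PySem.List.pyGetD numBlock k []) j 0) 0
      = numBlock.foldl (fun s row => s + PySem.List.pyGetD row j 0) 0 := fun j =>
    PySem.List.foldl_pyRange_zero_pyGetD' numBlock []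
      (fun s row => s + PySem.List.pyGetD row j 0) 0
  rw [PySem.List.foldl_append_singleton_eq_map, List.nil_append, h0,
      alt_fold_inv numBlock ((numBlock.headD []).length) (fun _ => (0 : Int))]
  simp only [hinner]
  rw [PySem.List.pyRange_zero_nat, List.map_map]
  simp [List.map_map, Function.comp]

-- ===== VERDICT (by name: the statement is the Claim_ definition above) =====
theorem runningtotal_spec : Claim_equal_runningtotal := by
  intro numBlock _ _
  exact runningtotal_eq numBlock
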